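-- pv_equiv track=rewrite | github.com/sandeshshingankar/-Practice-Hub- | LaptopCount.py | maxCost
-- ===== SOURCE A (Python) =====
-- def maxCost(cost, labels, dailyCount):
--     left = 0
--     legal_count = 0
--     current_cost = 0
--     max_cost = 0
--
--     for right in range(len(cost)):
--         current_cost += cost[right]
--
--         if labels[right] == "legal":
--             legal_count += 1
--
--         while legal_count > dailyCount:
--             current_cost -= cost[left]
--             if labels[left] == "legal":
--                 legal_count -= 1
--             left += 1
--
--         if legal_count == dailyCount:
--             max_cost = max(max_cost, current_cost)
--
--     return max_cost
-- ===== SOURCE B (Python) =====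
-- def maxCost(cost, labels, dailyCount):
--     q = []        # prefix sums recorded just after each "legal" day seen
--     head = 0      # queue read pointer
--     base = 0      # prefix sum at the window's left edge
--     s = 0         # running prefix sum
--     best = 0
--     for right in range(len(cost)):
--         s += cost[right]
--         if labels[right] == "legal":
--             q.append(s)
--         if len(q) - head > dailyCount:
--             base = q[head]
--             head += 1
--         if len(q) - head == dailyCount:
--             best = max(best, s - base)
--     return best
-- ===== Notes on version B (the rewrite author's own statement) =====
-- stated objective: alternative
-- what changed: Replaces A's shrink-the-window inner while loop and running window cost with a single pass that keeps a queue of prefix sums taken at 'legal' positions: the left edge advances by one O(1) queue pop per step and the window cost is a prefix-sum difference, so no per-element inner loop remains.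
import Mathlib
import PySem

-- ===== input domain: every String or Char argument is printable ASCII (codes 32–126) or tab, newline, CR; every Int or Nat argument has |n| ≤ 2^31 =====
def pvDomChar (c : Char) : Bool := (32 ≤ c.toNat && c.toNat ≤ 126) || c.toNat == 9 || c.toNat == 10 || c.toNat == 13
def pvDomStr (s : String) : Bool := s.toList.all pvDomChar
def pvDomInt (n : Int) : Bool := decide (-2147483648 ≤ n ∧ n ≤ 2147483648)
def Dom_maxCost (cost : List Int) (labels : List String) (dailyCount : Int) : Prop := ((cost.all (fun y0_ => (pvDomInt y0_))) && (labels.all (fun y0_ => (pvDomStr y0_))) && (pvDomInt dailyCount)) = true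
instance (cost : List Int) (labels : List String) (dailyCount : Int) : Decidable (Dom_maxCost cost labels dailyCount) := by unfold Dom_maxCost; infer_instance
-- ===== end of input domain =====

-- B replaces A's inner window-shrinking while loop by a single-pass queue of prefix sums
-- taken at "legal" positions (one O(1) pop per step); an alternative, structurally different pass.


-- ===== PORT A =====
-- A's inner `while legal_count > dailyCount` loop; fuel `cost.length` is a pure termination
-- guard (inside Pre_ the loop always stops before the fuel runs out, since Python would
-- otherwise raise IndexError at cost[left]).
def whileA (cost : List Int) (labels : List String) (dailyCount : Int) :
    Nat → Nat → Int → Int → Nat × Int × Int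
  | 0, left, lc, cc => (left, lc, cc)
  | fuel + 1, left, lc, cc =>
    if dailyCount < lc then
      whileA cost labels dailyCount fuel (left + 1)
        (if labels.getD left "" = "legal" then lc - 1 else lc)
        (cc - cost.getD left 0)
    else (left, lc, cc)

def stepA (cost : List Int) (labels : List String) (dailyCount : Int)
    (st : Nat × Int × Int × Int) (right : Nat) : Nat × Int × Int × Int :=
  match st with
  | (left, lc, cc, mc) =>
    let cc := cc + cost.getD right 0
    let lc := if labels.getD right "" = "legal" then lc + 1 else lc
    match whileA cost labels dailyCount cost.length left lc cc with
    | (left, lc, cc) => (left, lc, cc, if lc = dailyCount then max mc cc else mc)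

def maxCost (cost : List Int) (labels : List String) (dailyCount : Int) : Int :=
  ((List.range cost.length).foldl (stepA cost labels dailyCount) (0, 0, 0, 0)).2.2.2

-- ===== PORT B =====
def stepB (cost : List Int) (labels : List String) (dailyCount : Int)
    (st : List Int × Nat × Int × Int × Int) (right : Nat) : List Int × Nat × Int × Int × Int :=
  match st with
  | (q, head, base, s, best) =>
    let s := s + cost.getD right 0
    let q := if labels.getD right "" = "legal" then q ++ [s] else q
    match (if dailyCount < (q.length : Int) - (head : Int) then (head + 1, q.getD head 0) else (head, base)) with
    | (head, base) =>
      (q, head, base, s, if (q.length : Int) - (head : Int) = dailyCount then max best (s - base) else best)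

def maxCost_alt (cost : List Int) (labels : List String) (dailyCount : Int) : Int :=
  ((List.range cost.length).foldl (stepB cost labels dailyCount) ([], 0, 0, 0, 0)).2.2.2.2

-- ===== PRECONDITION & SPEC =====
-- Pre_ excludes exactly the inputs where Python A raises IndexError: labels shorter than cost
-- (labels[right] out of range), or a negative dailyCount with nonempty cost (the while loop
-- drains the window and then indexes cost[left] past the end).
def Pre_maxCost (cost : List Int) (labels : List String) (dailyCount : Int) : Prop :=
  cost.length ≤ labels.length ∧ (0 ≤ dailyCount ∨ cost = [])
instance (cost : List Int) (labels : List String) (dailyCount : Int) : Decidable (Pre_maxCost cost labels dailyCount) := by unfold Pre_maxCost; infer_instance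

def pvWitness_maxCost : List Int × List String × Int := ([3, -1, 4], ["legal", "x", "legal"], 1)

def Spec_maxCost (cost : List Int) (labels : List String) (dailyCount : Int) (out : Int) : Prop := out = maxCost_alt cost labels dailyCount
instance (cost : List Int) (labels : List String) (dailyCount : Int) (out : Int) : Decidable (Spec_maxCost cost labels dailyCount out) := by unfold Spec_maxCost; infer_instance

-- ===== CLAIM (what is proved, stated in full; the proofs are below) =====
def Claim_equal_maxCost : Prop := ∀ (cost : List Int) (labels : List String) (dailyCount : Int), Dom_maxCost cost labels dailyCount → Pre_maxCost cost labels dailyCount → Spec_maxCost cost labels dailyCount (maxCost cost labels dailyCount)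

-- ===== LEMMAS AND PROOFS =====

-- prefix sum of the first i costs
def pref (cost : List Int) (i : Nat) : Int := (cost.take i).sum

-- indices of the "legal" labels among 0..k-1
def legals (labels : List String) (k : Nat) : List Nat :=
  (List.range k).filter (fun i => labels.getD i "" == "legal")

lemma pref_succ (cost : List Int) (k : Nat) :
    pref cost (k + 1) = pref cost k + cost.getD k 0 := by
  unfold pref
  rw [List.take_add_one, List.sum_append]
  rcases h : cost[k]? with _ | c
  · simp [List.getD, h]
  · simp [List.getD, h]

lemma legals_succ (labels : List String) (k : Nat) :
    legals labels (k + 1) =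
      legals labels k ++ (if labels.getD k "" = "legal" then [k] else []) := by
  unfold legals
  rw [List.range_succ, List.filter_append]
  simp only [List.getD_eq_getElem?_getD]
  by_cases h : labels[k]?.getD "" = "legal"
  · simp [h]
  · have hb : (labels[k]?.getD "" == "legal") = false := beq_eq_false_iff_ne.mpr h
    simp [h, List.filter, hb]

lemma legals_sorted (labels : List String) (k : Nat) :
    List.Pairwise (· < ·) (legals labels k) := by
  exact (List.pairwise_lt_range (n := k)).filter _

lemma getD_eq_headD_drop {α : Type} [Inhabited α] :
    ∀ (l : List α) (n : Nat) (d : α), l.getD n d = (l.drop n).headD d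
  | [], n, d => by cases n <;> simp [List.getD]
  | a :: l, 0, d => by simp [List.getD]
  | a :: l, n + 1, d => by
      simpa [List.getD] using getD_eq_headD_drop l n d

lemma whileA_stop (cost : List Int) (labels : List String) (d : Int)
    (fuel left : Nat) (lc cc : Int) (h : ¬ d < lc) :
    whileA cost labels d fuel left lc cc = (left, lc, cc) := by
  cases fuel <;> simp [whileA, h]

lemma whileA_run (cost : List Int) (labels : List String) (d : Int) (j : Nat)
    (hjl : labels.getD j "" = "legal") :
    ∀ (fuel left : Nat) (cc : Int), left ≤ j → j + 1 - left ≤ fuel →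
    (∀ i, left ≤ i → i < j → ¬ labels.getD i "" = "legal") →
    whileA cost labels d fuel left (d + 1) cc =
      (j + 1, d, cc - (pref cost (j + 1) - pref cost left)) := by
  intro fuel
  induction fuel with
  | zero => intro left cc hlj hf _; omega
  | succ fuel ih =>
    intro left cc hlj hf hno
    rcases Nat.eq_or_lt_of_le hlj with heq | hlt
    · subst heq
      simp only [whileA, if_pos (by omega : d < d + 1), hjl, if_true]
      rw [show d + 1 - 1 = d from by ring,
        whileA_stop _ _ _ _ _ _ _ (lt_irrefl d), pref_succ cost left]
      simp only [Prod.mk.injEq, true_and]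
      ring
    · have hnl : ¬ labels.getD left "" = "legal" := hno left le_rfl hlt
      simp only [whileA, if_pos (by omega : d < d + 1), hnl, if_false]
      rw [ih (left + 1) (cc - cost.getD left 0) (by omega) (by omega)
        (fun i hi hij => hno i (by omega) hij), pref_succ cost left]
      simp only [Prod.mk.injEq, true_and]
      ring

-- the simulation invariant between A's state (left, lc, cc, mc) and B's state (q, head, base, s, best)
def SimInv (cost : List Int) (labels : List String) (d : Int) (k : Nat)
    (a : Nat × Int × Int × Int) (b : List Int × Nat × Int × Int × Int) : Prop :=
  b.1 = (legals labels k).map (fun j => pref cost (j + 1)) ∧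
  b.2.1 ≤ (legals labels k).length ∧
  a.2.1 = ((legals labels k).length : Int) - (b.2.1 : Int) ∧
  a.2.1 ≤ d ∧
  b.2.2.1 = pref cost a.1 ∧
  b.2.2.2.1 = pref cost k ∧
  a.2.2.1 = b.2.2.2.1 - b.2.2.1 ∧
  a.2.2.2 = b.2.2.2.2 ∧
  (∀ i, i ∈ (legals labels k).drop b.2.1 ↔ (a.1 ≤ i ∧ i < k ∧ labels.getD i "" = "legal")) ∧
  a.1 ≤ k

lemma inv_init (cost : List Int) (labels : List String) (d : Int) (hd : 0 ≤ d) :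
    SimInv cost labels d 0 (0, 0, 0, 0) ([], 0, 0, 0, 0) := by
  refine ⟨?_, ?_, ?_, ?_, ?_, ?_, ?_, ?_, ?_, ?_⟩ <;>
    simp [legals, pref, hd]

lemma inv_step (cost : List Int) (labels : List String) (d : Int) (hd : 0 ≤ d)
    (k : Nat) (hk : k < cost.length)
    (a : Nat × Int × Int × Int) (b : List Int × Nat × Int × Int × Int)
    (hinv : SimInv cost labels d k a b) :
    SimInv cost labels d (k + 1) (stepA cost labels d a k) (stepB cost labels d b k) := by
  obtain ⟨left, lc, cc, mc⟩ := a
  obtain ⟨q, head, base, s, best⟩ := b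
  obtain ⟨h1, h2, h3, h4, h5, h6, h7, h8, h9, h10⟩ := hinv
  simp only [SimInv] at h1 h2 h3 h4 h5 h6 h7 h8 h9 h10 ⊢
  have hs1 : s + cost.getD k 0 = pref cost (k + 1) := by rw [h6, pref_succ]
  by_cases hkl : labels.getD k "" = "legal"
  · -- the k-th label is legal
    have hL' : legals labels (k + 1) = legals labels k ++ [k] := by
      rw [legals_succ, if_pos hkl]
    have hq1 : q ++ [s + cost.getD k 0] = (legals labels (k + 1)).map (fun j => pref cost (j + 1)) := by
      rw [hL', List.map_append, ← h1, hs1]; rfl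
    have hlenL' : (legals labels (k + 1)).length = (legals labels k).length + 1 := by
      rw [hL']; simp
    have hq1len : (q ++ [s + cost.getD k 0]).length = (legals labels k).length + 1 := by
      simp [h1]
    have hdropL' : (legals labels (k + 1)).drop head = (legals labels k).drop head ++ [k] := by
      rw [hL', List.drop_append_of_le_length h2]
    have hmemD' : ∀ i, i ∈ (legals labels (k + 1)).drop head ↔
        (left ≤ i ∧ i < k + 1 ∧ labels.getD i "" = "legal") := by
      intro i
      rw [hdropL']
      simp only [List.mem_append, List.mem_singleton, h9 i]
      constructor
      · rintro (⟨hi1, hi2, hi3⟩ | rfl)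
        · exact ⟨hi1, by omega, hi3⟩
        · exact ⟨h10, by omega, hkl⟩
      · rintro ⟨hi1, hi2, hi3⟩
        by_cases hik : i = k
        · right; exact hik
        · left; exact ⟨hi1, by omega, hi3⟩
    have hsorted : ((legals labels (k + 1)).drop head).Pairwise (· < ·) :=
      (legals_sorted labels (k + 1)).drop
    by_cases hpop : d < lc + 1
    · -- the window now holds dailyCount+1 legal days: A shrinks, B pops one queue entry
      have hlcd : lc = d := by omega
      have hne : (legals labels (k + 1)).drop head ≠ [] := by rw [hdropL']; simp
      obtain ⟨j, t, hjt⟩ := List.exists_cons_of_ne_nil hne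
      have hjmem : j ∈ (legals labels (k + 1)).drop head := by
        rw [hjt]; exact List.mem_cons_self ..
      obtain ⟨hjl, hjk, hjleg⟩ := (hmemD' j).1 hjmem
      have hjlt : ∀ i ∈ t, j < i := by
        have hs := hsorted; rw [hjt] at hs
        exact fun i hi => (List.pairwise_cons.1 hs).1 i hi
      have hno : ∀ i, left ≤ i → i < j → ¬ labels.getD i "" = "legal" := by
        intro i hi hij hleg
        have hmem : i ∈ (legals labels (k + 1)).drop head := (hmemD' i).2 ⟨hi, by omega, hleg⟩
        rw [hjt] at hmem
        rcases List.mem_cons.1 hmem with rfl | hmem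
        · omega
        · exact absurd (hjlt i hmem) (by omega)
      have hwr : whileA cost labels d cost.length left (lc + 1) (cc + cost.getD k 0)
          = (j + 1, d, (cc + cost.getD k 0) - (pref cost (j + 1) - pref cost left)) := by
        rw [hlcd]
        exact whileA_run cost labels d j hjleg cost.length left _ hjl (by omega) hno
      have hcc' : (cc + cost.getD k 0) - (pref cost (j + 1) - pref cost left)
          = pref cost (k + 1) - pref cost (j + 1) := by
        have hp := pref_succ cost k
        rw [h7, h6, h5]
        omega
      have hA : stepA cost labels d (left, lc, cc, mc) k
          = (j + 1, d, pref cost (k + 1) - pref cost (j + 1),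
             max mc (pref cost (k + 1) - pref cost (j + 1))) := by
        simp only [stepA, if_pos hkl, hwr, hcc']
        simp
      have hbase' : (q ++ [s + cost.getD k 0]).getD head 0 = pref cost (j + 1) := by
        rw [getD_eq_headD_drop, hq1, ← List.map_drop, hjt]
        rfl
      have hB : stepB cost labels d (q, head, base, s, best) k
          = (q ++ [s + cost.getD k 0], head + 1, pref cost (j + 1), s + cost.getD k 0,
             max best ((s + cost.getD k 0) - pref cost (j + 1))) := by
        have hcond : d < ((q ++ [s + cost.getD k 0]).length : Int) - (head : Int) := by
          rw [hq1len]; push_cast; omega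
        have hcond2 : ((q ++ [s + cost.getD k 0]).length : Int) - ((head + 1 : Nat) : Int) = d := by
          rw [hq1len]; push_cast; omega
        simp only [stepB, if_pos hkl, if_pos hcond, hbase', if_pos hcond2]
      rw [hA, hB]
      dsimp only
      have hdrop2 : (legals labels (k + 1)).drop (head + 1) = t := by
        have hstep : (legals labels (k + 1)).drop (head + 1)
            = ((legals labels (k + 1)).drop head).drop 1 := by rw [List.drop_drop]
        rw [hstep, hjt]; rfl
      refine ⟨hq1, by omega, by push_cast; omega, le_refl d, rfl, hs1, by rw [hs1], by rw [h8, hs1],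
        ?_, by omega⟩
      intro i
      rw [hdrop2]
      constructor
      · intro hit
        have hiD : i ∈ (legals labels (k + 1)).drop head := by rw [hjt]; exact List.mem_cons_of_mem _ hit
        obtain ⟨hi1, hi2, hi3⟩ := (hmemD' i).1 hiD
        exact ⟨by have := hjlt i hit; omega, hi2, hi3⟩
      · rintro ⟨hi1, hi2, hi3⟩
        have hiD : i ∈ (legals labels (k + 1)).drop head := (hmemD' i).2 ⟨by omega, hi2, hi3⟩
        rw [hjt] at hiD
        rcases List.mem_cons.1 hiD with rfl | hit
        · omega
        · exact hit
    · -- still at most dailyCount legal days: no shrink, no pop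
      have hstop : whileA cost labels d cost.length left (lc + 1) (cc + cost.getD k 0)
          = (left, lc + 1, cc + cost.getD k 0) := whileA_stop _ _ _ _ _ _ _ hpop
      have hA : stepA cost labels d (left, lc, cc, mc) k
          = (left, lc + 1, cc + cost.getD k 0,
             if lc + 1 = d then max mc (cc + cost.getD k 0) else mc) := by
        simp only [stepA, if_pos hkl, hstop]
      have hB : stepB cost labels d (q, head, base, s, best) k
          = (q ++ [s + cost.getD k 0], head, base, s + cost.getD k 0,
             if lc + 1 = d then max best ((s + cost.getD k 0) - base) else best) := by
        have hcond : ¬ d < ((q ++ [s + cost.getD k 0]).length : Int) - (head : Int) := by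
          rw [hq1len]; push_cast; omega
        have hcond2 : (((q ++ [s + cost.getD k 0]).length : Int) - (head : Int) = d) ↔ (lc + 1 = d) := by
          rw [hq1len]; push_cast; omega
        simp only [stepB, if_pos hkl, if_neg hcond]
        by_cases hEq : lc + 1 = d
        · rw [if_pos (hcond2.2 hEq), if_pos hEq]
        · rw [if_neg (fun h => hEq (hcond2.1 h)), if_neg hEq]
      rw [hA, hB]
      dsimp only
      have hcc' : cc + cost.getD k 0 = (s + cost.getD k 0) - base := by omega
      refine ⟨hq1, by omega, by push_cast; omega, by omega, h5, hs1, hcc', ?_, hmemD', by omega⟩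
      by_cases hEq : lc + 1 = d
      · rw [if_pos hEq, if_pos hEq, h8, h7, h5]
        ring_nf
      · rw [if_neg hEq, if_neg hEq]; exact h8
  · -- the k-th label is not legal: nothing changes except the running sums
    have hL' : legals labels (k + 1) = legals labels k := by
      rw [legals_succ, if_neg hkl, List.append_nil]
    have hstop : whileA cost labels d cost.length left lc (cc + cost.getD k 0)
        = (left, lc, cc + cost.getD k 0) := whileA_stop _ _ _ _ _ _ _ (by omega)
    have hA : stepA cost labels d (left, lc, cc, mc) k
        = (left, lc, cc + cost.getD k 0,
           if lc = d then max mc (cc + cost.getD k 0) else mc) := by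
      simp only [stepA, if_neg hkl, hstop]
    have hB : stepB cost labels d (q, head, base, s, best) k
        = (q, head, base, s + cost.getD k 0,
           if lc = d then max best ((s + cost.getD k 0) - base) else best) := by
      have hcond : ¬ d < ((q.length : Int) - (head : Int)) := by
        have hql : q.length = (legals labels k).length := by rw [h1]; simp
        rw [hql]; push_cast; omega
      have hcond2 : ((q.length : Int) - (head : Int) = d) ↔ (lc = d) := by
        have hql : q.length = (legals labels k).length := by rw [h1]; simp
        rw [hql]; push_cast; omega
      simp only [stepB, if_neg hkl, if_neg hcond]
      by_cases hEq : lc = d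
      · rw [if_pos (hcond2.2 hEq), if_pos hEq]
      · rw [if_neg (fun h => hEq (hcond2.1 h)), if_neg hEq]
    rw [hA, hB, hL']
    dsimp only
    have hcc' : cc + cost.getD k 0 = (s + cost.getD k 0) - base := by omega
    refine ⟨h1, h2, h3, h4, h5, hs1, hcc', ?_, ?_, by omega⟩
    · by_cases hEq : lc = d
      · rw [if_pos hEq, if_pos hEq, h8, h7, h5]
        ring_nf
      · rw [if_neg hEq, if_neg hEq]; exact h8
    · intro i
      rw [h9 i]
      constructor
      · rintro ⟨hi1, hi2, hi3⟩; exact ⟨hi1, by omega, hi3⟩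
      · rintro ⟨hi1, hi2, hi3⟩
        refine ⟨hi1, ?_, hi3⟩
        by_cases hik : i = k
        · subst hik; exact absurd hi3 hkl
        · omega

lemma inv_fold (cost : List Int) (labels : List String) (d : Int) (hd : 0 ≤ d) :
    ∀ k, k ≤ cost.length → SimInv cost labels d k
      ((List.range k).foldl (stepA cost labels d) (0, 0, 0, 0))
      ((List.range k).foldl (stepB cost labels d) ([], 0, 0, 0, 0)) := by
  intro k
  induction k with
  | zero => intro _; simpa using inv_init cost labels d hd
  | succ k ih =>
    intro hk
    rw [List.range_succ, List.foldl_append, List.foldl_append]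
    simpa using inv_step cost labels d hd k (by omega) _ _ (ih (by omega))

-- ===== VERDICT (by name: the statement is the Claim_ definition above) =====
theorem maxCost_spec : Claim_equal_maxCost := by
  intro cost labels d _ hpre
  unfold Spec_maxCost maxCost maxCost_alt
  rcases hpre.2 with hd | hnil
  · exact (inv_fold cost labels d hd cost.length le_rfl).2.2.2.2.2.2.2.1
  · subst hnil; rfl
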